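-- pv_equiv track=rewrite | github.com/shanmukh-07/Owl-coder | Medium/Largest subsquare surrounded by X/largest-subsquare-surrounded-by-x.py | largestSubsquare
-- ===== SOURCE A (Python) =====
-- def largestSubsquare(n, a):
--     v = [[0]*n for _ in range(n)]
--     h = [[0]*n for _ in range(n)]
--     s = 0
--     for i in range(n):
--         for j in range(n):
--             if a[i][j] == 'X':
--                 v[i][j] = 1 if i == 0 else v[i-1][j]+1
--                 h[i][j] = 1 if j == 0 else h[i][j-1]+1
--     for i in range(n):
--         for j in range(n):
--             val = min(v[i][j],h[i][j])
--             while val > s: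
--                 if v[i][j-val+1] >= val and h[i-val+1][j] >= val:
--                     s = val
--                 val -= 1
--     return s
-- ===== SOURCE B (Python) =====
-- def largestSubsquare(n, a):
--     # Prefix-count tables: R[i][j] = number of 'X' in row i, columns < j;
--     # C[j][i] = number of 'X' in column j, rows < i.
--     R = []
--     for i in range(n):
--         row = [0]
--         for j in range(n):
--             row.append(row[-1] + (1 if a[i][j] == 'X' else 0))
--         R.append(row)
--     C = []
--     for j in range(n):
--         col = [0]
--         for i in range(n):
--             col.append(col[-1] + (1 if a[i][j] == 'X' else 0))
--         C.append(col)
--     best = 0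
--     for i in range(n):
--         for j in range(n):
--             limit = min(n - i, n - j)
--             for k in range(best + 1, limit + 1):
--                 i2, j2 = i + k, j + k
--                 if (R[i][j2] - R[i][j] == k
--                         and R[i2 - 1][j2] - R[i2 - 1][j] == k
--                         and C[j][i2] - C[j][i] == k
--                         and C[j2 - 1][i2] - C[j2 - 1][i] == k):
--                     best = k
--     return best
-- ===== Notes on version B (the rewrite author's own statement) =====
-- stated objective: alternative
-- what changed: Replaces A's vertical/horizontal run-length tables with per-row and per-column prefix X-counts plus an O(1) four-border count check per candidate square, scanning top-left corners and only testing sides larger than the current best, instead of A's two-corner run test at bottom-right corners.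
import Mathlib
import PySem

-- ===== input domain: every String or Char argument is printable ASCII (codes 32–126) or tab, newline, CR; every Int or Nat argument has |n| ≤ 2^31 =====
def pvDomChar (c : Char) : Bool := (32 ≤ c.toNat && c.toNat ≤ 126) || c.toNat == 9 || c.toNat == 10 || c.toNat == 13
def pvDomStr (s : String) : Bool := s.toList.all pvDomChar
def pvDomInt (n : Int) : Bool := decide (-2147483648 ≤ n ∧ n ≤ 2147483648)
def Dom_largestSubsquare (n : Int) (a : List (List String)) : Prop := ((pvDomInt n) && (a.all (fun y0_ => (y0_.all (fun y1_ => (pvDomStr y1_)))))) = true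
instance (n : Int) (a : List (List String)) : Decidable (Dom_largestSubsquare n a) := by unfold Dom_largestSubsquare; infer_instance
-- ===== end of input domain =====

-- B replaces A's vertical/horizontal run-length tables and two-corner test by per-row/per-column
-- prefix X-counts with a four-border count check, searching only sides larger than the current best.

-- ===== PORT A =====
-- a[i][j]; indices produced by the loops are nonnegative and in range on Pre_, so getD is exact
def cellA (a : List (List String)) (i j : Nat) : String := (a.getD i []).getD j ""

-- inner body of A's first double loop: builds row i of v and h (cells left 0 when not 'X')
def buildRowA (n : Nat) (a : List (List String)) (vprev : List Nat) (i : Nat) : List Nat × List Nat :=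
  (List.range n).foldl (fun st j =>
    if cellA a i j = "X" then
      (st.1 ++ [if i = 0 then 1 else vprev.getD j 0 + 1],
       st.2 ++ [if j = 0 then 1 else st.2.getD (j-1) 0 + 1])
    else (st.1 ++ [0], st.2 ++ [0])) ([], [])

-- A's first double loop; st.1.getD (i-1) [] is v[i-1] (only consulted when i > 0)
def buildA (n : Nat) (a : List (List String)) : List (List Nat) × List (List Nat) :=
  (List.range n).foldl (fun st i =>
    ((st.1 ++ [(buildRowA n a (st.1.getD (i-1) []) i).1]),
     (st.2 ++ [(buildRowA n a (st.1.getD (i-1) []) i).2]))) ([], [])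

-- A's `while val > s` loop: on success s becomes val and the loop then exits with s = val
def whileA (cond : Nat → Bool) : Nat → Nat → Nat
  | 0, s => s
  | v+1, s => if v+1 ≤ s then s else if cond (v+1) then v+1 else whileA cond v s

-- A's second double loop; j+1-t is Python's j-val+1 (t ≤ h[i][j] ≤ j+1, so no wraparound occurs)
def scanA (n : Nat) (v h : List (List Nat)) : Nat :=
  (List.range n).foldl (fun s i =>
    (List.range n).foldl (fun s j =>
      whileA (fun t => decide (t ≤ (v.getD i []).getD (j+1-t) 0) &&
                       decide (t ≤ (h.getD (i+1-t) []).getD j 0))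
        (min ((v.getD i []).getD j 0) ((h.getD i []).getD j 0)) s) s) 0

def largestSubsquare (n : Int) (a : List (List String)) : Int :=
  ((scanA n.toNat (buildA n.toNat a).1 (buildA n.toNat a).2 : Nat) : Int)

-- ===== PORT B =====
def cellB (a : List (List String)) (i j : Nat) : String := (a.getD i []).getD j ""

-- row i of R: prefix counts of 'X' along the row; row[-1] is row.getD j (the row has length j+1 there)
def buildR (n : Nat) (a : List (List String)) : List (List Nat) :=
  (List.range n).foldl (fun R i =>
    R ++ [(List.range n).foldl
      (fun row j => row ++ [row.getD j 0 + (if cellB a i j = "X" then 1 else 0)]) [0]]) []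

def buildC (n : Nat) (a : List (List String)) : List (List Nat) :=
  (List.range n).foldl (fun C j =>
    C ++ [(List.range n).foldl
      (fun col i => col ++ [col.getD i 0 + (if cellB a i j = "X" then 1 else 0)]) [0]]) []

-- the four-border prefix-count test; prefix counts are monotone, so Nat subtraction is exact here
def checkB (R C : List (List Nat)) (i j k : Nat) : Bool :=
  ((R.getD i []).getD (j+k) 0 - (R.getD i []).getD j 0 == k) &&
  ((R.getD (i+k-1) []).getD (j+k) 0 - (R.getD (i+k-1) []).getD j 0 == k) &&
  ((C.getD j []).getD (i+k) 0 - (C.getD j []).getD i 0 == k) &&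
  ((C.getD (j+k-1) []).getD (i+k) 0 - (C.getD (j+k-1) []).getD i 0 == k)

-- range(best+1, limit+1) has limit-best elements (0 when limit ≤ best), as in Python
def scanB (n : Nat) (R C : List (List Nat)) : Nat :=
  (List.range n).foldl (fun best i =>
    (List.range n).foldl (fun best j =>
      (List.range' (best+1) (min (n-i) (n-j) - best)).foldl
        (fun b k => if checkB R C i j k then k else b) best) best) 0

def largestSubsquare_alt (n : Int) (a : List (List String)) : Int :=
  ((scanB n.toNat (buildR n.toNat a) (buildC n.toNat a) : Nat) : Int)

-- ===== PRECONDITION & SPEC =====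
-- Pre_ excludes exactly the inputs on which Python A raises IndexError: n > 0 with fewer than n
-- rows, or one of the first n rows shorter than n.
def Pre_largestSubsquare (n : Int) (a : List (List String)) : Prop :=
  n ≤ (a.length : Int) ∧ ∀ row ∈ a.take n.toNat, n ≤ (row.length : Int)
instance (n : Int) (a : List (List String)) : Decidable (Pre_largestSubsquare n a) := by
  unfold Pre_largestSubsquare; infer_instance

def pvWitness_largestSubsquare : Int × List (List String) :=
  (2, [["X", "X"], ["X", "X"]])

def Spec_largestSubsquare (n : Int) (a : List (List String)) (out : Int) : Prop := out = largestSubsquare_alt n a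
instance (n : Int) (a : List (List String)) (out : Int) : Decidable (Spec_largestSubsquare n a out) := by unfold Spec_largestSubsquare; infer_instance

-- ===== CLAIM (what is proved, stated in full; the proofs are below) =====
def Claim_equal_largestSubsquare : Prop := ∀ (n : Int) (a : List (List String)), Dom_largestSubsquare n a → Pre_largestSubsquare n a → Spec_largestSubsquare n a (largestSubsquare n a)

-- ===== LEMMAS AND PROOFS =====

-- the common specification layer: borders of squares, runs, prefix counts
def pvIsX (a : List (List String)) (i j : Nat) : Bool := decide ((a.getD i []).getD j "" = "X")

def lineAll (f : Nat → Bool) (s k : Nat) : Bool := (List.range k).all fun t => f (s+t)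

-- square with top-left (i,j), side k, all four borders 'X', inside the n×n board
def pvGood (n : Nat) (a : List (List String)) (i j k : Nat) : Bool :=
  decide (i+k ≤ n) && decide (j+k ≤ n) &&
  lineAll (fun t => pvIsX a i t) j k && lineAll (fun t => pvIsX a (i+k-1) t) j k &&
  lineAll (fun t => pvIsX a t j) i k && lineAll (fun t => pvIsX a t (j+k-1)) i k

def pvIsMax (n : Nat) (a : List (List String)) (r : Nat) : Prop :=
  (r = 0 ∨ (1 ≤ r ∧ ∃ i j, pvGood n a i j r = true)) ∧
  (∀ k i j, 1 ≤ k → pvGood n a i j k = true → k ≤ r)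

theorem pvIsMax_unique (n : Nat) (a : List (List String)) (r1 r2 : Nat)
    (h1 : pvIsMax n a r1) (h2 : pvIsMax n a r2) : r1 = r2 := by
  obtain ⟨c1, m1⟩ := h1
  obtain ⟨c2, m2⟩ := h2
  have h12 : r1 ≤ r2 := by
    rcases c1 with h | ⟨hr, i, j, hg⟩
    · omega
    · exact m2 r1 i j hr hg
  have h21 : r2 ≤ r1 := by
    rcases c2 with h | ⟨hr, i, j, hg⟩
    · omega
    · exact m1 r2 i j hr hg
  omega

def specRun (f : Nat → Bool) : Nat → Nat
  | 0 => if f 0 then 1 else 0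
  | i+1 => if f (i+1) then specRun f i + 1 else 0

def specCnt (f : Nat → Bool) : Nat → Nat
  | 0 => 0
  | j+1 => specCnt f j + (if f j then 1 else 0)

theorem getD_map_range {α : Type} (f : Nat → α) (d : α) (m t : Nat) (h : t < m) :
    ((List.range m).map f).getD t d = f t := by
  simp [List.getD_eq_getElem?_getD, h]

theorem lineAll_succ (f : Nat → Bool) (s k : Nat) :
    lineAll f s (k+1) = (lineAll f s k && f (s+k)) := by
  simp [lineAll, List.range_succ]

theorem specRun_char (f : Nat → Bool) (i t : Nat) (ht : 1 ≤ t) :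
    t ≤ specRun f i ↔ t ≤ i + 1 ∧ lineAll f (i+1-t) t = true := by
  induction i generalizing t with
  | zero =>
    cases hf : f 0 <;> simp only [specRun, hf, Bool.false_eq_true, if_true, if_false]
    · constructor
      · intro h; omega
      · rintro ⟨h1, h2⟩
        have h1' : t = 1 := by omega
        subst h1'
        simp [lineAll, hf] at h2
    · constructor
      · intro h
        have h1' : t = 1 := by omega
        subst h1'
        exact ⟨by omega, by simp [lineAll, hf]⟩
      · rintro ⟨h1, h2⟩
        have h1' : t = 1 := by omega
        omega
  | succ i ih =>
    cases hf : f (i+1) <;> simp only [specRun, hf, Bool.false_eq_true, if_true, if_false]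
    · constructor
      · intro h; omega
      · rintro ⟨h1, h2⟩
        exfalso
        obtain ⟨u, rfl⟩ : ∃ u, t = u+1 := ⟨t-1, by omega⟩
        rw [lineAll_succ] at h2
        have harg : i+1+1-(u+1)+u = i+1 := by omega
        rw [harg] at h2
        simp [hf] at h2
    · obtain _ | t := t
      · omega
      obtain _ | u := t
      · simp only [show (0:Nat)+1 = 1 from rfl]
        constructor
        · intro _
          refine ⟨by omega, ?_⟩
          have harg : i+1+1-1 = i+1 := by omega
          rw [harg]
          simp [lineAll, hf]
        · intro _
          omega
      · have h' := ih (u+1) (by omega)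
        constructor
        · intro h
          have hu : u+1 ≤ specRun f i := by omega
          obtain ⟨hb, hl⟩ := h'.mp hu
          refine ⟨by omega, ?_⟩
          have harg : i+1+1-(u+1+1) = i+1-(u+1) := by omega
          rw [harg, lineAll_succ]
          have harg2 : i+1-(u+1)+(u+1) = i+1 := by omega
          rw [harg2]
          simp only [hf, Bool.and_true]
          exact hl
        · rintro ⟨hb, hl⟩
          have harg : i+1+1-(u+1+1) = i+1-(u+1) := by omega
          rw [harg, lineAll_succ] at hl
          simp only [Bool.and_eq_true] at hl
          have := h'.mpr ⟨by omega, hl.1⟩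
          omega

theorem specCnt_le (f : Nat → Bool) (s k : Nat) :
    specCnt f s ≤ specCnt f (s+k) ∧ specCnt f (s+k) ≤ specCnt f s + k := by
  induction k with
  | zero => simp
  | succ k ih =>
    rw [show s+(k+1) = (s+k)+1 from rfl]
    simp only [specCnt]
    split <;> omega

theorem specCnt_char (f : Nat → Bool) (s k : Nat) :
    specCnt f (s+k) = specCnt f s + k ↔ lineAll f s k = true := by
  induction k with
  | zero => simp [lineAll]
  | succ k ih =>
    rw [show s+(k+1) = (s+k)+1 from rfl]
    simp only [specCnt, lineAll_succ, Bool.and_eq_true]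
    have hle := specCnt_le f s k
    by_cases hf : f (s+k)
    · simp only [hf, if_true, and_true]
      constructor
      · intro h
        exact ih.mp (by omega)
      · intro h
        rw [ih.mpr h]
        omega
    · simp only [hf, Bool.false_eq_true, if_false, and_false, iff_false]
      intro h
      omega

theorem specCnt_sub (f : Nat → Bool) (s k : Nat) :
    ((specCnt f (s+k) - specCnt f s == k) = true) ↔ lineAll f s k = true := by
  rw [← specCnt_char]
  have h := specCnt_le f s k
  simp only [beq_iff_eq]
  omega

-- ===== B-side structure lemmas =====

theorem ite_cellB (a : List (List String)) (i j : Nat) :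
    (if cellB a i j = "X" then (1:Nat) else 0) = (if pvIsX a i j then 1 else 0) := by
  simp [pvIsX, cellB]

theorem foldl_append_map {α : Type} (g : Nat → α) (m : Nat) :
    (List.range m).foldl (fun L i => L ++ [g i]) [] = (List.range m).map g := by
  induction m with
  | zero => simp
  | succ m ih =>
    rw [List.range_succ, List.foldl_append, ih]
    simp

theorem buildRow_cnt (f : Nat → Bool) (m : Nat) :
    (List.range m).foldl (fun row j => row ++ [row.getD j 0 + (if f j then 1 else 0)]) [0]
      = (List.range (m+1)).map (specCnt f) := by
  induction m with
  | zero => simp [List.range_succ, specCnt]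
  | succ m ih =>
    rw [List.range_succ, List.foldl_append, ih]
    simp only [List.foldl_cons, List.foldl_nil]
    rw [getD_map_range (specCnt f) 0 (m+1) m (by omega)]
    conv_rhs => rw [List.range_succ]
    rw [List.map_append]
    rfl

theorem buildR_eq (n : Nat) (a : List (List String)) :
    buildR n a = (List.range n).map (fun i => (List.range (n+1)).map (specCnt (fun t => pvIsX a i t))) := by
  unfold buildR
  rw [foldl_append_map]
  refine List.map_congr_left (fun i _ => ?_)
  simp only [ite_cellB]
  exact buildRow_cnt (fun t => pvIsX a i t) n

theorem buildC_eq (n : Nat) (a : List (List String)) :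
    buildC n a = (List.range n).map (fun j => (List.range (n+1)).map (specCnt (fun t => pvIsX a t j))) := by
  unfold buildC
  rw [foldl_append_map]
  refine List.map_congr_left (fun j _ => ?_)
  simp only [ite_cellB]
  exact buildRow_cnt (fun t => pvIsX a t j) n

theorem buildR_entry (n : Nat) (a : List (List String)) (i x : Nat) (hi : i < n) (hx : x ≤ n) :
    ((buildR n a).getD i []).getD x 0 = specCnt (fun t => pvIsX a i t) x := by
  rw [buildR_eq, getD_map_range _ _ _ _ hi, getD_map_range _ _ _ _ (by omega)]

theorem buildC_entry (n : Nat) (a : List (List String)) (j x : Nat) (hj : j < n) (hx : x ≤ n) :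
    ((buildC n a).getD j []).getD x 0 = specCnt (fun t => pvIsX a t j) x := by
  rw [buildC_eq, getD_map_range _ _ _ _ hj, getD_map_range _ _ _ _ (by omega)]

theorem checkB_iff (n : Nat) (a : List (List String)) (i j k : Nat)
    (hi : i < n) (hj : j < n) (hk : 1 ≤ k) (hik : i + k ≤ n) (hjk : j + k ≤ n) :
    checkB (buildR n a) (buildC n a) i j k = true ↔ pvGood n a i j k = true := by
  unfold checkB pvGood
  rw [buildR_entry n a i (j+k) hi (by omega), buildR_entry n a i j hi (by omega),
      buildR_entry n a (i+k-1) (j+k) (by omega) (by omega),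
      buildR_entry n a (i+k-1) j (by omega) (by omega),
      buildC_entry n a j (i+k) hj (by omega), buildC_entry n a j i hj (by omega),
      buildC_entry n a (j+k-1) (i+k) (by omega) (by omega),
      buildC_entry n a (j+k-1) i (by omega) (by omega)]
  simp only [Bool.and_eq_true, decide_eq_true_eq]
  rw [specCnt_sub, specCnt_sub, specCnt_sub, specCnt_sub]
  constructor
  · intro h
    exact ⟨⟨⟨⟨⟨hik, hjk⟩, h.1.1.1⟩, h.1.1.2⟩, h.1.2⟩, h.2⟩
  · intro h
    exact ⟨⟨⟨h.1.1.1.2, h.1.1.2⟩, h.1.2⟩, h.2⟩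

theorem foldB_range' (chk : Nat → Bool) (len : Nat) :
    ∀ c b, b < c →
      b ≤ (List.range' c len).foldl (fun acc k => if chk k then k else acc) b ∧
      ((List.range' c len).foldl (fun acc k => if chk k then k else acc) b = b ∨
        (c ≤ (List.range' c len).foldl (fun acc k => if chk k then k else acc) b ∧
         (List.range' c len).foldl (fun acc k => if chk k then k else acc) b < c + len ∧
         chk ((List.range' c len).foldl (fun acc k => if chk k then k else acc) b) = true)) ∧
      (∀ k, c ≤ k → k < c + len → chk k = true →
        k ≤ (List.range' c len).foldl (fun acc k => if chk k then k else acc) b) := by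
  induction len with
  | zero =>
    intro c b hbc
    simp only [List.range'_zero, List.foldl_nil]
    exact ⟨le_refl _, Or.inl (by trivial), fun k hk1 hk2 _ => by omega⟩
  | succ len ih =>
    intro c b hbc
    simp only [List.range'_succ, List.foldl_cons]
    by_cases hc : chk c = true
    · rw [if_pos hc]
      obtain ⟨ih1, ih2, ih3⟩ := ih (c+1) c (by omega)
      refine ⟨by omega, ?_, ?_⟩
      · rcases ih2 with h | ⟨h1, h2, h3⟩
        · exact Or.inr ⟨by omega, by omega, by rw [h]; exact hc⟩
        · exact Or.inr ⟨by omega, by omega, h3⟩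
      · intro k hk1 hk2 hchk
        rcases Nat.eq_or_lt_of_le hk1 with h | h
        · omega
        · exact ih3 k (by omega) (by omega) hchk
    · rw [if_neg hc]
      obtain ⟨ih1, ih2, ih3⟩ := ih (c+1) b (by omega)
      refine ⟨ih1, ?_, ?_⟩
      · rcases ih2 with h | ⟨h1, h2, h3⟩
        · exact Or.inl h
        · exact Or.inr ⟨by omega, by omega, h3⟩
      · intro k hk1 hk2 hchk
        rcases Nat.eq_or_lt_of_le hk1 with h | h
        · exact absurd (h ▸ hchk) hc
        · exact ih3 k (by omega) (by omega) hchk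

-- ===== A-side structure lemmas =====

theorem buildRowA_aux (n : Nat) (a : List (List String)) (vprev : List Nat) (i : Nat)
    (hp : i = 0 ∨ ∀ j, j < n → vprev.getD j 0 = specRun (fun t => pvIsX a t j) (i-1)) :
    ∀ m, m ≤ n →
    (List.range m).foldl (fun st j =>
      if cellA a i j = "X" then
        (st.1 ++ [if i = 0 then 1 else vprev.getD j 0 + 1],
         st.2 ++ [if j = 0 then 1 else st.2.getD (j-1) 0 + 1])
      else (st.1 ++ [0], st.2 ++ [0])) ([], [])
      = ((List.range m).map (fun j => specRun (fun t => pvIsX a t j) i),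
         (List.range m).map (fun j => specRun (fun t => pvIsX a i t) j)) := by
  intro m
  induction m with
  | zero => intro _; simp
  | succ m ih =>
    intro hm
    rw [List.range_succ, List.foldl_append, ih (by omega)]
    simp only [List.foldl_cons, List.foldl_nil, List.map_append, List.map_cons, List.map_nil]
    by_cases hx : cellA a i m = "X"
    · have hfx : pvIsX a i m = true := decide_eq_true hx
      rw [if_pos hx]
      have e1 : (if i = 0 then (1:Nat) else vprev.getD m 0 + 1)
          = specRun (fun t => pvIsX a t m) i := by
        cases i with
        | zero => simp [specRun, hfx]
        | succ i' =>
          have hp'' := (hp.resolve_left (by omega)) m (by omega)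
          simp only [Nat.add_sub_cancel] at hp''
          rw [if_neg (by omega), hp'']
          simp [specRun, hfx]
      have e2 : (if m = 0 then (1:Nat)
            else ((List.range m).map (fun j => specRun (fun t => pvIsX a i t) j)).getD (m-1) 0 + 1)
          = specRun (fun t => pvIsX a i t) m := by
        cases m with
        | zero => simp [specRun, hfx]
        | succ m' =>
          rw [if_neg (by omega), getD_map_range _ _ _ _ (by omega)]
          simp [specRun, hfx]
      rw [e1, e2]
    · have hfx : pvIsX a i m = false := decide_eq_false hx
      rw [if_neg hx]
      have e1 : specRun (fun t => pvIsX a t m) i = 0 := by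
        cases i <;> simp [specRun, hfx]
      have e2 : specRun (fun t => pvIsX a i t) m = 0 := by
        cases m <;> simp [specRun, hfx]
      rw [e1, e2]

theorem buildRowA_eq (n : Nat) (a : List (List String)) (vprev : List Nat) (i : Nat)
    (hp : i = 0 ∨ ∀ j, j < n → vprev.getD j 0 = specRun (fun t => pvIsX a t j) (i-1)) :
    buildRowA n a vprev i
      = ((List.range n).map (fun j => specRun (fun t => pvIsX a t j) i),
         (List.range n).map (fun j => specRun (fun t => pvIsX a i t) j)) := by
  exact buildRowA_aux n a vprev i hp n (le_refl n)

theorem buildA_eq (n : Nat) (a : List (List String)) :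
    buildA n a
      = ((List.range n).map (fun i => (List.range n).map (fun j => specRun (fun t => pvIsX a t j) i)),
         (List.range n).map (fun i => (List.range n).map (fun j => specRun (fun t => pvIsX a i t) j))) := by
  unfold buildA
  suffices h : ∀ m, m ≤ n →
      (List.range m).foldl (fun st i =>
        ((st.1 ++ [(buildRowA n a (st.1.getD (i-1) []) i).1]),
         (st.2 ++ [(buildRowA n a (st.1.getD (i-1) []) i).2]))) ([], [])
      = ((List.range m).map (fun i => (List.range n).map (fun j => specRun (fun t => pvIsX a t j) i)),
         (List.range m).map (fun i => (List.range n).map (fun j => specRun (fun t => pvIsX a i t) j))) by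
    exact h n (le_refl n)
  intro m
  induction m with
  | zero => intro _; simp
  | succ m ih =>
    intro hm
    rw [List.range_succ, List.foldl_append, ih (by omega)]
    simp only [List.foldl_cons, List.foldl_nil, List.map_append, List.map_cons, List.map_nil]
    have he : buildRowA n a
        (((List.range m).map (fun i => (List.range n).map (fun j => specRun (fun t => pvIsX a t j) i))).getD (m-1) []) m
        = ((List.range n).map (fun j => specRun (fun t => pvIsX a t j) m),
           (List.range n).map (fun j => specRun (fun t => pvIsX a m t) j)) := by
      apply buildRowA_eq
      cases m with
      | zero => exact Or.inl rfl
      | succ m' =>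
        right
        intro j hj
        rw [getD_map_range _ _ _ _ (by omega)]
        rw [getD_map_range _ _ _ _ hj]
    rw [he]

theorem whileA_prop (cond : Nat → Bool) (val : Nat) :
    ∀ s, s ≤ whileA cond val s ∧
      (whileA cond val s = s ∨
        (s < whileA cond val s ∧ whileA cond val s ≤ val ∧ cond (whileA cond val s) = true)) ∧
      (∀ t, s < t → t ≤ val → cond t = true → t ≤ whileA cond val s) := by
  induction val with
  | zero =>
    intro s
    simp only [whileA]
    exact ⟨le_refl _, Or.inl (by trivial), fun t h1 h2 _ => by omega⟩
  | succ v ih =>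
    intro s
    simp only [whileA]
    by_cases h1 : v+1 ≤ s
    · rw [if_pos h1]
      exact ⟨le_refl _, Or.inl (by trivial), fun t ht1 ht2 _ => by omega⟩
    · rw [if_neg h1]
      by_cases h2 : cond (v+1) = true
      · rw [if_pos h2]
        exact ⟨by omega, Or.inr ⟨by omega, le_refl _, h2⟩, fun t ht1 ht2 _ => by omega⟩
      · rw [if_neg h2]
        obtain ⟨i1, i2, i3⟩ := ih s
        refine ⟨i1, ?_, ?_⟩
        · rcases i2 with h | ⟨a1, a2, a3⟩
          · exact Or.inl h
          · exact Or.inr ⟨a1, by omega, a3⟩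
        · intro t ht1 ht2 hc
          rcases Nat.eq_or_lt_of_le ht2 with he | hl
          · exact absurd (he ▸ hc) h2
          · exact i3 t ht1 (by omega) hc

-- soundness of A's two-corner test: it exhibits a bordered square
theorem bridgeA_sound (n : Nat) (a : List (List String)) (i j t : Nat)
    (hi : i < n) (hj : j < n) (ht : 1 ≤ t)
    (h1 : t ≤ specRun (fun u => pvIsX a u j) i) (h2 : t ≤ specRun (fun u => pvIsX a i u) j)
    (h3 : t ≤ specRun (fun u => pvIsX a u (j+1-t)) i) (h4 : t ≤ specRun (fun u => pvIsX a (i+1-t) u) j) :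
    pvGood n a (i+1-t) (j+1-t) t = true := by
  have c1 := (specRun_char _ i t ht).mp h1
  have c2 := (specRun_char _ j t ht).mp h2
  have c3 := (specRun_char _ i t ht).mp h3
  have c4 := (specRun_char _ j t ht).mp h4
  have hbi : t ≤ i + 1 := c1.1
  have hbj : t ≤ j + 1 := c2.1
  simp only [pvGood, Bool.and_eq_true, decide_eq_true_eq]
  refine ⟨⟨⟨⟨⟨by omega, by omega⟩, ?_⟩, ?_⟩, ?_⟩, ?_⟩
  · exact c4.2
  · have e : i+1-t+t-1 = i := by omega
    simp only [e]
    exact c2.2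
  · exact c3.2
  · have e : j+1-t+t-1 = j := by omega
    simp only [e]
    exact c1.2

-- completeness: a bordered square passes the test at its bottom-right corner
theorem bridgeA_complete (n : Nat) (a : List (List String)) (i0 j0 t : Nat)
    (ht : 1 ≤ t) (hg : pvGood n a i0 j0 t = true) :
    t ≤ specRun (fun u => pvIsX a u (j0+t-1)) (i0+t-1) ∧
    t ≤ specRun (fun u => pvIsX a (i0+t-1) u) (j0+t-1) ∧
    t ≤ specRun (fun u => pvIsX a u j0) (i0+t-1) ∧
    t ≤ specRun (fun u => pvIsX a i0 u) (j0+t-1) ∧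
    i0 + t - 1 < n ∧ j0 + t - 1 < n := by
  simp only [pvGood, Bool.and_eq_true, decide_eq_true_eq] at hg
  obtain ⟨⟨⟨⟨⟨g1, g2⟩, g3⟩, g4⟩, g5⟩, g6⟩ := hg
  have e1 : i0+t-1+1-t = i0 := by omega
  have e2 : j0+t-1+1-t = j0 := by omega
  refine ⟨?_, ?_, ?_, ?_, by omega, by omega⟩
  · exact (specRun_char _ _ t ht).mpr ⟨by omega, by rw [e1]; exact g6⟩
  · exact (specRun_char _ _ t ht).mpr ⟨by omega, by rw [e2]; exact g4⟩
  · exact (specRun_char _ _ t ht).mpr ⟨by omega, by rw [e1]; exact g5⟩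
  · exact (specRun_char _ _ t ht).mpr ⟨by omega, by rw [e2]; exact g3⟩

-- ===== assembling the two scans =====

def pvCells (n : Nat) : List (Nat × Nat) :=
  (List.range n).flatMap (fun i => (List.range n).map (fun j => (i, j)))

theorem mem_pvCells (n : Nat) (p : Nat × Nat) : p ∈ pvCells n ↔ p.1 < n ∧ p.2 < n := by
  obtain ⟨x, y⟩ := p
  simp [pvCells, List.mem_flatMap, List.mem_map, List.mem_range]

theorem foldl_nested {α : Type} (I J : List Nat) (g : Nat → Nat → α → α) (s0 : α) :
    I.foldl (fun s i => J.foldl (fun s j => g i j s) s) s0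
      = (I.flatMap (fun i => J.map (fun j => (i, j)))).foldl (fun s p => g p.1 p.2 s) s0 := by
  induction I generalizing s0 with
  | nil => simp
  | cons i I ih =>
    simp only [List.foldl_cons, List.flatMap_cons, List.foldl_append, List.foldl_map]
    exact ih _

theorem whileA_congr (c1 c2 : Nat → Bool) (h : ∀ t, 1 ≤ t → c1 t = c2 t) (val : Nat) :
    ∀ s, whileA c1 val s = whileA c2 val s := by
  induction val with
  | zero => intro s; rfl
  | succ v ih =>
    intro s
    simp only [whileA, h (v+1) (by omega), ih s]

def pvV (a : List (List String)) (i j : Nat) : Nat := specRun (fun u => pvIsX a u j) i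
def pvH (a : List (List String)) (i j : Nat) : Nat := specRun (fun u => pvIsX a i u) j
def pvCondA (a : List (List String)) (i j t : Nat) : Bool :=
  decide (t ≤ pvV a i (j+1-t)) && decide (t ≤ pvH a (i+1-t) j)
def pvStepA (a : List (List String)) (s : Nat) (p : Nat × Nat) : Nat :=
  whileA (pvCondA a p.1 p.2) (min (pvV a p.1 p.2) (pvH a p.1 p.2)) s

theorem scanA_fold_prop (n : Nat) (a : List (List String)) (L : List (Nat × Nat))
    (hL : ∀ p ∈ L, p.1 < n ∧ p.2 < n) : ∀ s0 : Nat,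
    s0 ≤ L.foldl (pvStepA a) s0 ∧
    (L.foldl (pvStepA a) s0 = s0 ∨
      (1 ≤ L.foldl (pvStepA a) s0 ∧ ∃ i0 j0, pvGood n a i0 j0 (L.foldl (pvStepA a) s0) = true)) ∧
    (∀ p ∈ L, ∀ t i0 j0, 1 ≤ t → i0+t-1 = p.1 → j0+t-1 = p.2 →
      pvGood n a i0 j0 t = true → t ≤ L.foldl (pvStepA a) s0) := by
  induction L with
  | nil =>
    intro s0
    exact ⟨le_refl _, Or.inl rfl, fun p hp => absurd hp (by simp)⟩
  | cons p L ih =>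
    intro s0
    obtain ⟨hp1, hp2⟩ := hL p List.mem_cons_self
    simp only [List.foldl_cons]
    obtain ⟨w1, w2, w3⟩ := whileA_prop (pvCondA a p.1 p.2)
      (min (pvV a p.1 p.2) (pvH a p.1 p.2)) s0
    rw [show whileA (pvCondA a p.1 p.2) (min (pvV a p.1 p.2) (pvH a p.1 p.2)) s0
        = pvStepA a s0 p from rfl] at w1 w2 w3
    obtain ⟨i1, i2, i3⟩ := ih (fun q hq => hL q (List.mem_cons_of_mem _ hq)) (pvStepA a s0 p)
    refine ⟨le_trans w1 i1, ?_, ?_⟩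
    · rcases i2 with h | h
      · rcases w2 with h' | ⟨hlt, hle, hcond⟩
        · exact Or.inl (by rw [h]; exact h')
        · right
          rw [h]
          simp only [pvCondA, Bool.and_eq_true, decide_eq_true_eq] at hcond
          refine ⟨by omega, p.1+1-(pvStepA a s0 p), p.2+1-(pvStepA a s0 p), ?_⟩
          exact bridgeA_sound n a p.1 p.2 (pvStepA a s0 p) hp1 hp2 (by omega)
            (le_trans hle (Nat.min_le_left _ _))
            (le_trans hle (Nat.min_le_right _ _)) hcond.1 hcond.2
      · exact Or.inr h
    · intro q hq t i0 j0 ht hei hej hg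
      rcases List.mem_cons.mp hq with rfl | hq'
      · obtain ⟨b1, b2, b3, b4, b5, b6⟩ := bridgeA_complete n a i0 j0 t ht hg
        rw [hei] at b1 b2 b3
        rw [hej] at b1 b2 b4
        have hj0 : q.2+1-t = j0 := by omega
        have hi0 : q.1+1-t = i0 := by omega
        by_cases hts : t ≤ s0
        · exact le_trans (le_trans hts w1) i1
        · refine le_trans (w3 t (by omega) (by exact le_min b1 b2) ?_) i1
          simp only [pvCondA, Bool.and_eq_true, decide_eq_true_eq]
          exact ⟨by rw [hj0]; exact b3, by rw [hi0]; exact b4⟩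
      · exact i3 q hq' t i0 j0 ht hei hej hg

theorem scanA_isMax (n : Nat) (a : List (List String)) :
    pvIsMax n a (scanA n (buildA n a).1 (buildA n a).2) := by
  have hfold : scanA n (buildA n a).1 (buildA n a).2 = (pvCells n).foldl (pvStepA a) 0 := by
    unfold scanA
    have hV : (buildA n a).1
        = (List.range n).map (fun i => (List.range n).map (fun j => specRun (fun t => pvIsX a t j) i)) := by
      rw [buildA_eq]
    have hH : (buildA n a).2
        = (List.range n).map (fun i => (List.range n).map (fun j => specRun (fun t => pvIsX a i t) j)) := by
      rw [buildA_eq]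
    rw [hV, hH, foldl_nested]
    apply PySem.List.foldl_congr_mem
    intro s q hq
    obtain ⟨hq1, hq2⟩ := (mem_pvCells n q).mp hq
    unfold pvStepA pvCondA pvV pvH
    rw [getD_map_range _ _ _ _ hq1, getD_map_range _ _ _ _ hq1,
        getD_map_range _ _ _ _ hq2, getD_map_range _ _ _ _ hq2]
    apply whileA_congr
    intro t ht
    rw [getD_map_range _ _ _ _ (show q.2+1-t < n by omega),
        getD_map_range _ _ _ _ (show q.1+1-t < n by omega),
        getD_map_range _ _ _ _ hq2]
  rw [hfold]
  obtain ⟨_, i2, i3⟩ := scanA_fold_prop n a (pvCells n) (fun p hp => (mem_pvCells n p).mp hp) 0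
  constructor
  · exact i2
  · intro k i j hk hg
    obtain ⟨b1, b2, b3, b4, b5, b6⟩ := bridgeA_complete n a i j k hk hg
    exact i3 (i+k-1, j+k-1) ((mem_pvCells n _).mpr ⟨b5, b6⟩) k i j hk rfl rfl hg

def pvStepB (n : Nat) (R C : List (List Nat)) (best : Nat) (p : Nat × Nat) : Nat :=
  (List.range' (best+1) (min (n-p.1) (n-p.2) - best)).foldl
    (fun b k => if checkB R C p.1 p.2 k then k else b) best

-- a bordered square fits inside the board, bounding its side from its top-left corner
theorem pvGood_bounds (n : Nat) (a : List (List String)) (i j k : Nat)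
    (hg : pvGood n a i j k = true) : i + k ≤ n ∧ j + k ≤ n := by
  simp only [pvGood, Bool.and_eq_true, decide_eq_true_eq] at hg
  exact ⟨hg.1.1.1.1.1, hg.1.1.1.1.2⟩

theorem stepB_prop (n : Nat) (a : List (List String)) (p : Nat × Nat)
    (hp1 : p.1 < n) (hp2 : p.2 < n) (b : Nat) :
    b ≤ pvStepB n (buildR n a) (buildC n a) b p ∧
    (pvStepB n (buildR n a) (buildC n a) b p = b ∨
      (1 ≤ pvStepB n (buildR n a) (buildC n a) b p ∧
        pvGood n a p.1 p.2 (pvStepB n (buildR n a) (buildC n a) b p) = true)) ∧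
    (∀ k, 1 ≤ k → pvGood n a p.1 p.2 k = true → k ≤ pvStepB n (buildR n a) (buildC n a) b p) := by
  obtain ⟨f1, f2, f3⟩ := foldB_range' (fun k => checkB (buildR n a) (buildC n a) p.1 p.2 k)
    (min (n-p.1) (n-p.2) - b) (b+1) b (by omega)
  rw [show (List.range' (b+1) (min (n-p.1) (n-p.2) - b)).foldl
      (fun acc k => if checkB (buildR n a) (buildC n a) p.1 p.2 k then k else acc) b
      = pvStepB n (buildR n a) (buildC n a) b p from rfl] at f1 f2 f3
  refine ⟨f1, ?_, ?_⟩
  · rcases f2 with h | ⟨h1, h2, h3⟩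
    · exact Or.inl h
    · right
      refine ⟨by omega, ?_⟩
      exact (checkB_iff n a p.1 p.2 _ hp1 hp2 (by omega) (by omega) (by omega)).mp h3
  · intro k hk hg
    obtain ⟨g1, g2⟩ := pvGood_bounds n a p.1 p.2 k hg
    by_cases hkb : k ≤ b
    · exact le_trans hkb f1
    · exact f3 k (by omega) (by omega)
        ((checkB_iff n a p.1 p.2 k hp1 hp2 hk g1 g2).mpr hg)

theorem scanB_fold_prop (n : Nat) (a : List (List String)) (L : List (Nat × Nat))
    (hL : ∀ p ∈ L, p.1 < n ∧ p.2 < n) : ∀ s0 : Nat,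
    s0 ≤ L.foldl (pvStepB n (buildR n a) (buildC n a)) s0 ∧
    (L.foldl (pvStepB n (buildR n a) (buildC n a)) s0 = s0 ∨
      (1 ≤ L.foldl (pvStepB n (buildR n a) (buildC n a)) s0 ∧
        ∃ i j, pvGood n a i j (L.foldl (pvStepB n (buildR n a) (buildC n a)) s0) = true)) ∧
    (∀ p ∈ L, ∀ k, 1 ≤ k → pvGood n a p.1 p.2 k = true →
      k ≤ L.foldl (pvStepB n (buildR n a) (buildC n a)) s0) := by
  induction L with
  | nil =>
    intro s0
    exact ⟨le_refl _, Or.inl rfl, fun p hp => absurd hp (by simp)⟩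
  | cons p L ih =>
    intro s0
    obtain ⟨hp1, hp2⟩ := hL p List.mem_cons_self
    simp only [List.foldl_cons]
    obtain ⟨w1, w2, w3⟩ := stepB_prop n a p hp1 hp2 s0
    obtain ⟨i1, i2, i3⟩ := ih (fun q hq => hL q (List.mem_cons_of_mem _ hq))
      (pvStepB n (buildR n a) (buildC n a) s0 p)
    refine ⟨le_trans w1 i1, ?_, ?_⟩
    · rcases i2 with h | h
      · rcases w2 with h' | ⟨h1, h2⟩
        · exact Or.inl (by rw [h]; exact h')
        · exact Or.inr ⟨by omega, p.1, p.2, by rw [h]; exact h2⟩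
      · exact Or.inr h
    · intro q hq k hk hg
      rcases List.mem_cons.mp hq with rfl | hq'
      · exact le_trans (w3 k hk hg) i1
      · exact i3 q hq' k hk hg

theorem scanB_isMax (n : Nat) (a : List (List String)) :
    pvIsMax n a (scanB n (buildR n a) (buildC n a)) := by
  have hfold : scanB n (buildR n a) (buildC n a)
      = (pvCells n).foldl (pvStepB n (buildR n a) (buildC n a)) 0 := by
    unfold scanB
    rw [foldl_nested]
    rfl
  rw [hfold]
  obtain ⟨_, i2, i3⟩ := scanB_fold_prop n a (pvCells n) (fun p hp => (mem_pvCells n p).mp hp) 0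
  constructor
  · exact i2
  · intro k i j hk hg
    obtain ⟨g1, g2⟩ := pvGood_bounds n a i j k hg
    exact i3 (i, j) ((mem_pvCells n _).mpr ⟨by omega, by omega⟩) k hk hg

-- ===== VERDICT (by name: the statement is the Claim_ definition above) =====
theorem largestSubsquare_spec : Claim_equal_largestSubsquare := by
  intro n a _ _
  unfold Spec_largestSubsquare largestSubsquare largestSubsquare_alt
  have := pvIsMax_unique n.toNat a _ _ (scanA_isMax n.toNat a) (scanB_isMax n.toNat a)
  exact_mod_cast this
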